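-- pv_equiv track=rewrite | github.com/viveksahu92/hacktoberfest25 | symptom_checker.py | symptom_lookup
-- ===== SOURCE A (Python) =====
-- from typing import Dict, List
--
-- def symptom_lookup(symptoms: str) -> Dict[str, str]:
--     """Analyze symptoms and return possible conditions.
--
--     Args:
--         symptoms: Patient's symptoms (e.g., "fever and sore throat")
--
--     Returns:
--         dict with status, condition, and confidence level
--     """
--     # Parameter validation
--     if not symptoms or not isinstance(symptoms, str):
--         return {"status": "error", "error_message": "Symptoms must be a non-empty string"}
--
--     symptoms_lower = symptoms.lower()
--
--     # Mock symptom-to-condition mapping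
--     if any(word in symptoms_lower for word in ["fever", "chills", "sore throat", "cough", "headache"]):
--         if "fever" in symptoms_lower and "sore throat" in symptoms_lower:
--             condition = "Flu-like symptoms"
--             confidence = "High"
--         elif "fever" in symptoms_lower and "cough" in symptoms_lower:
--             condition = "Common cold or respiratory infection"
--             confidence = "Medium"
--         else:
--             condition = "General viral infection"
--             confidence = "Medium"
--     elif any(word in symptoms_lower for word in ["headache", "nausea", "dizziness"]):
--         condition = "Possible migraine or tension headache"
--         confidence = "Medium"
--     elif any(word in symptoms_lower for word in ["stomach", "abdominal", "nausea", "vomiting"]):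
--         condition = "Gastrointestinal issue"
--         confidence = "Medium"
--     else:
--         condition = "Unclear - may need professional evaluation"
--         confidence = "Low"
--
--     return {
--         "status": "success",
--         "condition": condition,
--         "confidence": confidence,
--         "symptoms_analyzed": symptoms
--     }
-- ===== SOURCE B (Python) =====
-- # Single-pass keyword scanner: walk the lowercased text once, collecting every
-- # keyword that starts at each position into a matched set, then decide the
-- # condition from that set with a flattened priority chain (no repeated
-- # substring searches inside the decision).
-- KEYWORDS = ("fever", "chills", "sore throat", "cough", "headache",
--             "nausea", "dizziness", "stomach", "abdominal", "vomiting")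
--
-- def symptom_lookup(symptoms: str):
--     if not symptoms or not isinstance(symptoms, str):
--         return {"status": "error", "error_message": "Symptoms must be a non-empty string"}
--     text = symptoms.lower()
--     found = set()
--     for i in range(len(text)):
--         for kw in KEYWORDS:
--             if text.startswith(kw, i):
--                 found.add(kw)
--     if "fever" in found and "sore throat" in found:
--         condition, confidence = "Flu-like symptoms", "High"
--     elif "fever" in found and "cough" in found:
--         condition, confidence = "Common cold or respiratory infection", "Medium"
--     elif any(k in found for k in ("fever", "chills", "sore throat", "cough", "headache")):
--         condition, confidence = "General viral infection", "Medium"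
--     elif any(k in found for k in ("headache", "nausea", "dizziness")):
--         condition, confidence = "Possible migraine or tension headache", "Medium"
--     elif any(k in found for k in ("stomach", "abdominal", "nausea", "vomiting")):
--         condition, confidence = "Gastrointestinal issue", "Medium"
--     else:
--         condition, confidence = "Unclear - may need professional evaluation", "Low"
--     return {"status": "success", "condition": condition, "confidence": confidence,
--             "symptoms_analyzed": symptoms}
-- ===== Notes on version B (the rewrite author's own statement) =====
-- stated objective: alternative
-- what changed: Instead of repeated whole-text substring searches driven by a nested if/elif cascade, B scans the lowercased text once, collecting every keyword that starts at each position into a matched set, and then decides the condition from that set with a flattened priority chain.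
import Mathlib
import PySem

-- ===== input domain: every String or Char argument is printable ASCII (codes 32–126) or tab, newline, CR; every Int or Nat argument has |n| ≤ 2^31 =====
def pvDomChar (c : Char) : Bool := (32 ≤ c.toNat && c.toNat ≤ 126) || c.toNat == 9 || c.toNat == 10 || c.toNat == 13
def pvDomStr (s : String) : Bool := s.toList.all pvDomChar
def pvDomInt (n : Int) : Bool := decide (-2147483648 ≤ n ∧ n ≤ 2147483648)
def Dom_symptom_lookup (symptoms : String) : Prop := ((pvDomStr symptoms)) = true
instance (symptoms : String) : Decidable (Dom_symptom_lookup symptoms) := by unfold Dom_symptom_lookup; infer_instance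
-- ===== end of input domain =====

-- B scans the lowercased text once collecting the matched keywords into a set, then decides
-- the condition from that set (objective: alternative algorithm, same cost); return-value
-- equivalence is proved below.

-- ===== PORT A =====
def symptom_lookup (symptoms : String) : List (String × String) :=
  if symptoms = "" then
    [("status", "error"), ("error_message", "Symptoms must be a non-empty string")]
  else
    let symptoms_lower := PySem.Str.lower symptoms
    let p : String × String :=
      if ["fever", "chills", "sore throat", "cough", "headache"].any
          (fun word => PySem.Str.isIn word symptoms_lower) then
        if PySem.Str.isIn "fever" symptoms_lower && PySem.Str.isIn "sore throat" symptoms_lower then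
          ("Flu-like symptoms", "High")
        else if PySem.Str.isIn "fever" symptoms_lower && PySem.Str.isIn "cough" symptoms_lower then
          ("Common cold or respiratory infection", "Medium")
        else
          ("General viral infection", "Medium")
      else if ["headache", "nausea", "dizziness"].any
          (fun word => PySem.Str.isIn word symptoms_lower) then
        ("Possible migraine or tension headache", "Medium")
      else if ["stomach", "abdominal", "nausea", "vomiting"].any
          (fun word => PySem.Str.isIn word symptoms_lower) then
        ("Gastrointestinal issue", "Medium")
      else
        ("Unclear - may need professional evaluation", "Low")
    [("status", "success"), ("condition", p.1), ("confidence", p.2),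
     ("symptoms_analyzed", symptoms)]

-- ===== PORT B =====
def pvKeywords : List String :=
  ["fever", "chills", "sore throat", "cough", "headache",
   "nausea", "dizziness", "stomach", "abdominal", "vomiting"]

-- the scanning pass: for i in range(len(text)): for kw in KEYWORDS: if text.startswith(kw, i): found.add(kw)
-- (text.startswith(kw, i) for 0 ≤ i < len(text) is exactly "kw is a prefix of text[i:]")
def pvScan (chars : List Char) : PySem.Set String :=
  (List.range chars.length).foldl
    (fun s i =>
      pvKeywords.foldl
        (fun s kw => if PySem.Chars.startswith (chars.drop i) kw.toList then PySem.Set.add s kw else s)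
        s)
    PySem.Set.empty

def symptom_lookup_alt (symptoms : String) : List (String × String) :=
  if symptoms = "" then
    [("status", "error"), ("error_message", "Symptoms must be a non-empty string")]
  else
    let text := PySem.Str.lower symptoms
    let found := pvScan text.toList
    let p : String × String :=
      if PySem.Set.contains found "fever" && PySem.Set.contains found "sore throat" then
        ("Flu-like symptoms", "High")
      else if PySem.Set.contains found "fever" && PySem.Set.contains found "cough" then
        ("Common cold or respiratory infection", "Medium")
      else if ["fever", "chills", "sore throat", "cough", "headache"].any
          (fun k => PySem.Set.contains found k) then
        ("General viral infection", "Medium")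
      else if ["headache", "nausea", "dizziness"].any
          (fun k => PySem.Set.contains found k) then
        ("Possible migraine or tension headache", "Medium")
      else if ["stomach", "abdominal", "nausea", "vomiting"].any
          (fun k => PySem.Set.contains found k) then
        ("Gastrointestinal issue", "Medium")
      else
        ("Unclear - may need professional evaluation", "Low")
    [("status", "success"), ("condition", p.1), ("confidence", p.2),
     ("symptoms_analyzed", symptoms)]

-- ===== PRECONDITION & SPEC =====
def Spec_symptom_lookup (symptoms : String) (out : List (String × String)) : Prop := out = symptom_lookup_alt symptoms
instance (symptoms : String) (out : List (String × String)) : Decidable (Spec_symptom_lookup symptoms out) := by unfold Spec_symptom_lookup; infer_instance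

-- ===== CLAIM (what is proved, stated in full; the proofs are below) =====
def Claim_equal_symptom_lookup : Prop := ∀ (symptoms : String), Dom_symptom_lookup symptoms → Spec_symptom_lookup symptoms (symptom_lookup symptoms)

-- ===== LEMMAS AND PROOFS =====

-- membership in the inner keyword fold
theorem pv_mem_inner (q : String → Bool) (ks : List String) (s : PySem.Set String) (x : String) :
    x ∈ ks.foldl (fun s k => if q k then PySem.Set.add s k else s) s ↔
      x ∈ s ∨ (x ∈ ks ∧ q x) := by
  induction ks generalizing s with
  | nil => simp
  | cons k ks ih =>
    simp only [List.foldl_cons, ih, List.mem_cons]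
    by_cases hq : q k = true <;> simp [hq, PySem.Set.mem_add] <;> aesop

-- membership in the scanning double fold
theorem pv_mem_outer (q : Nat → String → Bool) (idx : List Nat) (ks : List String)
    (s : PySem.Set String) (x : String) :
    x ∈ idx.foldl (fun s i => ks.foldl (fun s k => if q i k then PySem.Set.add s k else s) s) s ↔
      x ∈ s ∨ ∃ i ∈ idx, x ∈ ks ∧ q i x := by
  induction idx generalizing s with
  | nil => simp
  | cons i idx ih =>
    simp only [List.foldl_cons, ih, pv_mem_inner, List.mem_cons]
    aesop

-- the scan finds exactly the keywords occurring as substrings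
theorem pv_scan_contains (chars : List Char) (k : String) (hk : k ∈ pvKeywords)
    (hne : k.toList ≠ []) :
    PySem.Set.contains (pvScan chars) k = PySem.Chars.isIn k.toList chars := by
  rw [Bool.eq_iff_iff]
  have hmem : k ∈ pvScan chars ↔ ∃ i ∈ List.range chars.length,
      k ∈ pvKeywords ∧ PySem.Chars.startswith (chars.drop i) k.toList := by
    simpa [pvScan, PySem.Set.empty] using
      pv_mem_outer (fun i kw => PySem.Chars.startswith (chars.drop i) kw.toList)
        (List.range chars.length) pvKeywords [] k
  have hcontains : PySem.Set.contains (pvScan chars) k = true ↔ k ∈ pvScan chars := by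
    simp [PySem.Set.contains]
  rw [hcontains, hmem, ← PySem.Chars.exists_prefix_drop_iff_isIn]
  constructor
  · rintro ⟨i, _, _, h⟩
    exact ⟨i, (PySem.Chars.startswith_iff _ _).mp h⟩
  · rintro ⟨j, hj⟩
    by_cases hlt : j < chars.length
    · exact ⟨j, List.mem_range.mpr hlt, hk, (PySem.Chars.startswith_iff _ _).mpr hj⟩
    · exfalso
      have : chars.drop j = [] := List.drop_eq_nil_of_le (Nat.le_of_not_lt hlt)
      rw [this] at hj
      exact hne (List.prefix_nil.mp hj)

-- ===== VERDICT (by name: the statement is the Claim_ definition above) =====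
set_option maxHeartbeats 4000000 in
theorem symptom_lookup_spec : Claim_equal_symptom_lookup := by
  intro symptoms _
  unfold Spec_symptom_lookup symptom_lookup symptom_lookup_alt
  by_cases h : symptoms = ""
  · simp [h]
  · simp only [if_neg h]
    set t := PySem.Str.lower symptoms with ht
    have hc : ∀ k ∈ pvKeywords, k.toList ≠ [] →
        PySem.Set.contains (pvScan t.toList) k = PySem.Str.isIn k t := by
      intro k hk hne
      rw [pv_scan_contains t.toList k hk hne, PySem.Str.isIn_eq]
    have h1 := hc "fever" (by simp [pvKeywords]) (by decide)
    have h2 := hc "chills" (by simp [pvKeywords]) (by decide)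
    have h3 := hc "sore throat" (by simp [pvKeywords]) (by decide)
    have h4 := hc "cough" (by simp [pvKeywords]) (by decide)
    have h5 := hc "headache" (by simp [pvKeywords]) (by decide)
    have h6 := hc "nausea" (by simp [pvKeywords]) (by decide)
    have h7 := hc "dizziness" (by simp [pvKeywords]) (by decide)
    have h8 := hc "stomach" (by simp [pvKeywords]) (by decide)
    have h9 := hc "abdominal" (by simp [pvKeywords]) (by decide)
    have h10 := hc "vomiting" (by simp [pvKeywords]) (by decide)
    simp only [List.any_cons, List.any_nil, h1, h2, h3, h4, h5, h6, h7, h8, h9, h10]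
    rcases Bool.dichotomy (PySem.Str.isIn "fever" t) with b1 | b1 <;>
    rcases Bool.dichotomy (PySem.Str.isIn "chills" t) with b2 | b2 <;>
    rcases Bool.dichotomy (PySem.Str.isIn "sore throat" t) with b3 | b3 <;>
    rcases Bool.dichotomy (PySem.Str.isIn "cough" t) with b4 | b4 <;>
    rcases Bool.dichotomy (PySem.Str.isIn "headache" t) with b5 | b5 <;>
    rcases Bool.dichotomy (PySem.Str.isIn "nausea" t) with b6 | b6 <;>
    rcases Bool.dichotomy (PySem.Str.isIn "dizziness" t) with b7 | b7 <;>
    rcases Bool.dichotomy (PySem.Str.isIn "stomach" t) with b8 | b8 <;>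
    rcases Bool.dichotomy (PySem.Str.isIn "abdominal" t) with b9 | b9 <;>
    rcases Bool.dichotomy (PySem.Str.isIn "vomiting" t) with b10 | b10 <;>
    simp only [b1, b2, b3, b4, b5, b6, b7, b8, b9, b10] <;> rfl
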